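-- pv_equiv track=rewrite | github.com/olumolu/consoleAI | ai.py | _picker_filter_models
-- ===== SOURCE A (Python) =====
-- def _picker_filter_models(models: list[str], query: str) -> list[str]:
--     q = (query or "").strip().lower()
--     if not q:
--         return list(models)
--
--     parts =[p for p in q.split() if p]
--     if not parts:
--         return list(models)
--
--     out: list[str] =[]
--     for model in models:
--         ml = model.lower()
--         if all(part in ml for part in parts):
--             out.append(model)
--     return out
-- ===== SOURCE B (Python) =====
-- def _picker_filter_models(models: list[str], query: str) -> list[str]:
--     out = list(models)
--     for part in (query or "").strip().lower().split():
--         out = [m for m in out if part in m.lower()]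
--     return out
-- ===== Notes on version B (the rewrite author's own statement) =====
-- stated objective: simpler
-- what changed: Replaces A's guard clauses plus per-model all()-over-parts scan with successive narrowing filter passes, one per query word, over a shrinking candidate list; split() yielding [] for blank queries makes the empty-query guards unnecessary.
import Mathlib
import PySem

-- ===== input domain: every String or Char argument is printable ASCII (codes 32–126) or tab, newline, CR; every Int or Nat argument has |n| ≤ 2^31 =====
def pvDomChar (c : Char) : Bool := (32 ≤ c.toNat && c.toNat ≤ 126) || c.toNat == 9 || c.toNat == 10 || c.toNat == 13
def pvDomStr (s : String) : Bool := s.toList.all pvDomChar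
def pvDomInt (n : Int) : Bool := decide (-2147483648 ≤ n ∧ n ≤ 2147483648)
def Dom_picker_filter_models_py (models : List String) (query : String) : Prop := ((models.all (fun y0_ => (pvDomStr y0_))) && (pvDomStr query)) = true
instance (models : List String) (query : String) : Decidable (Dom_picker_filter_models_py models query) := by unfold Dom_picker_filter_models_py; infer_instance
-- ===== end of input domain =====

-- B replaces A's guard clauses and per-model all()-scan by successive narrowing
-- filter passes, one per query word; equivalence proved for all inputs.


-- ===== PORT A =====
def picker_filter_models_py (models : List String) (query : String) : List String :=
  let q := PySem.Str.lower (PySem.Str.strip query)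
  if q = "" then models
  else
    let parts := (PySem.Str.split₀ q).filter (fun p => p ≠ "")
    if parts = [] then models
    else
      models.foldl (fun out model =>
        let ml := PySem.Str.lower model
        if parts.all (fun part => PySem.Str.isIn part ml) then out ++ [model] else out) []

-- ===== PORT B =====
def picker_filter_models_py_alt (models : List String) (query : String) : List String :=
  (PySem.Str.split₀ (PySem.Str.lower (PySem.Str.strip query))).foldl
    (fun out part => out.filter (fun m => PySem.Str.isIn part (PySem.Str.lower m))) models

-- ===== PRECONDITION & SPEC =====
def Spec_picker_filter_models_py (models : List String) (query : String) (out : List String) : Prop := out = picker_filter_models_py_alt models query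
instance (models : List String) (query : String) (out : List String) : Decidable (Spec_picker_filter_models_py models query out) := by unfold Spec_picker_filter_models_py; infer_instance

-- ===== CLAIM (what is proved, stated in full; the proofs are below) =====
def Claim_equal_picker_filter_models_py : Prop := ∀ (models : List String) (query : String), Dom_picker_filter_models_py models query → Spec_picker_filter_models_py models query (picker_filter_models_py models query)

-- ===== LEMMAS AND PROOFS =====

-- B's successive filter passes compute the single filter by the conjunction of all parts.
theorem pv_fold_filter (parts models : List String) :
    parts.foldl (fun out part => out.filter (fun m => PySem.Str.isIn part (PySem.Str.lower m))) models
      = models.filter (fun m => parts.all (fun p => PySem.Str.isIn p (PySem.Str.lower m))) := by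
  induction parts generalizing models with
  | nil => simp
  | cons p ps ih =>
      simp only [List.foldl_cons, ih, List.filter_filter]
      apply List.filter_congr
      intro m _
      simp [Bool.and_comm]

-- The empty string is a substring of everything.
theorem pv_isIn_empty (s : String) : PySem.Str.isIn "" s = true := by
  rw [PySem.Str.isIn_iff_infix]
  exact List.nil_infix

-- dropping "" tokens does not change an `all` whose predicate holds at "".
theorem pv_all_filter_ne (l : List String) (p : String → Bool) (h : p "" = true) :
    (l.filter (fun x => x ≠ "")).all p = l.all p := by
  induction l with
  | nil => rfl
  | cons x xs ih =>
      rw [List.all_cons, ← ih, List.filter_cons]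
      by_cases hx : x = ""
      · simp [hx, h]
      · simp [hx]

-- ===== VERDICT (by name: the statement is the Claim_ definition above) =====
theorem picker_filter_models_py_spec : Claim_equal_picker_filter_models_py := by
  intro models query _
  unfold Spec_picker_filter_models_py picker_filter_models_py picker_filter_models_py_alt
  set q := PySem.Str.lower (PySem.Str.strip query) with hq
  by_cases h0 : q = ""
  · simp only [h0]
    have : PySem.Str.split₀ "" = [] := by
      simp [PySem.Str.split₀, PySem.Chars.split₀]
      rfl
    rw [this]
    rfl
  · rw [if_neg h0, pv_fold_filter]
    by_cases hp : (PySem.Str.split₀ q).filter (fun p => p ≠ "") = []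
    · rw [if_pos hp]
      have hall : ∀ m : String,
          (PySem.Str.split₀ q).all (fun p => PySem.Str.isIn p (PySem.Str.lower m)) = true := by
        intro m
        have hfe := pv_all_filter_ne (PySem.Str.split₀ q)
          (fun p => PySem.Str.isIn p (PySem.Str.lower m)) (pv_isIn_empty _)
        rw [← hfe, hp]
        rfl
      rw [List.filter_congr (fun m _ => hall m)]
      simp
    · rw [if_neg hp, PySem.List.foldl_append_if_eq_filter]
      rw [List.nil_append]
      apply List.filter_congr
      intro m _
      exact pv_all_filter_ne _ _ (pv_isIn_empty _)
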